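-- pv_equiv track=rewrite | github.com/geioi/adventofcode2025 | day7.py | part2
-- ===== SOURCE A (Python) =====
-- def part2 (lines):
--     splitters = {}
--     starting_position = 0
--     for i in range(len(lines)):
--         for j in range(len(lines[i])):
--             if lines[i][j] == 'S':
--                 starting_position = j
--             elif lines[i][j] == '^':
--                 if i in splitters:
--                     splitters[i].append(j)
--                 else:
--                     splitters[i] = [j]
--     splitters = dict(sorted(splitters.items()))
--
--     traverse_counts = {starting_position: 1}
--     for i in range(len(lines)):
--         for k, v in list(traverse_counts.items()):
--             if i in splitters:
--                 if k in splitters[i]: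
--                     traverse_counts[k-1] = traverse_counts.get(k-1, 0) + v
--                     traverse_counts[k+1] = traverse_counts.get(k+1, 0) + v
--                     traverse_counts.pop(k)
--     return sum(traverse_counts.values())
-- ===== SOURCE B (Python) =====
-- def part2(lines):
--     start = 0
--     rows = []
--     for line in lines:
--         cols = []
--         for j, c in enumerate(line):
--             if c == 'S':
--                 start = j
--             elif c == '^':
--                 cols.append(j)
--         if cols:
--             rows.append(cols)
--     w = {}
--     for cols in reversed(rows):
--         new = dict(w)
--         for c in cols:
--             new[c] = w.get(c - 1, 1) + w.get(c + 1, 1)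
--         w = new
--     return w.get(start, 1)
-- ===== Notes on version B (the rewrite author's own statement) =====
-- stated objective: faster
-- what changed: B replaces A's forward particle simulation (pushing a column->count dict down through every grid row, re-iterating the whole dict even for rows without splitters) by a reverse dynamic program: one scan collects the splitter rows and the start column, then a bottom-up fold over only the splitter rows builds a column->leaf-count multiplier table (default 1, touching only splitter columns) and the answer is the multiplier of the start column.
-- outside the precondition, e.g. on part2(['.^', '.S^', '^^']): A returns 4, B returns 5
import Mathlib
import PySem

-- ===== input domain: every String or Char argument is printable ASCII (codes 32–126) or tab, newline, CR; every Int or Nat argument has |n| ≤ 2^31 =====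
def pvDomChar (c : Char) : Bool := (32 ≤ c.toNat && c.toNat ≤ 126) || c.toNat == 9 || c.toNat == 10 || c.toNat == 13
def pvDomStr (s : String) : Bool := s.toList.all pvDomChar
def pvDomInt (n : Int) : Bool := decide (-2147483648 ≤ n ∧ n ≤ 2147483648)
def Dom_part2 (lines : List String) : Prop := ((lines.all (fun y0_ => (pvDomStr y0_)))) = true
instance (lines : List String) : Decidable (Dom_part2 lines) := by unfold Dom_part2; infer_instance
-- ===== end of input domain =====

-- B replaces A's forward particle simulation (a counts-dict pushed down through every grid row)
-- by a reverse dynamic program computing, bottom-up over the splitter rows only, the leaf-count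
-- multiplier of each column, and reads off the multiplier of the start column (measured faster
-- in a timing run); proved equal on grids with no two horizontally adjacent '^'.

-- ===== PORT A =====
-- A-side helper: body of the inner 'for j in range(len(lines[i]))' scan (splitters/start build)
def scanChar (i : Int) (st : (PySem.Dict Int (List Int)) × Int) (j : Int) (ch : Char) :
    (PySem.Dict Int (List Int)) × Int :=
  if ch == 'S' then (st.1, j)
  else if ch == '^' then
    (if st.1.contains i then (st.1.insert i (st.1.getD i [] ++ [j]), st.2)
     else (st.1.insert i [j], st.2))
  else st

-- A-side helper: body of the inner 'for k, v in list(traverse_counts.items())' loop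
def rowStepA (sp : PySem.Dict Int (List Int)) (i : Int) (c : PySem.Dict Int Int)
    (kv : Int × Int) : PySem.Dict Int Int :=
  match sp.get? i with
  | some cols =>
      if cols.contains kv.1 then
        let c1 := c.insert (kv.1 - 1) (c.getD (kv.1 - 1) 0 + kv.2)
        let c2 := c1.insert (kv.1 + 1) (c1.getD (kv.1 + 1) 0 + kv.2)
        -- traverse_counts.pop(k): k is a live key here (it is only removed at its own
        -- snapshot turn), so pop never raises and equals erase
        c2.erase kv.1
      else c
  | none => c

def part2 (lines : List String) : Int :=
  let st := (PySem.List.pyRange 0 (PySem.List.len lines)).foldl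
    (fun st i =>
      let line := PySem.List.pyGetD lines i ""
      (PySem.List.pyRange 0 (PySem.Str.len line)).foldl
        (fun st j => scanChar i st j (PySem.List.pyGetD line.toList j ' ')) st)
    (PySem.Dict.empty, 0)
  -- splitters = dict(sorted(splitters.items())): the keys are distinct ints, so Python's
  -- tuple comparison orders the items by key and never compares the list components
  let sp : PySem.Dict Int (List Int) := PySem.Dict.mk (PySem.List.sorted st.1.items (fun p => p.1))
  let tc0 : PySem.Dict Int Int := PySem.Dict.empty.insert st.2 1
  let tc := (PySem.List.pyRange 0 (PySem.List.len lines)).foldl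
    (fun tc i => tc.items.foldl (rowStepA sp i) tc) tc0
  tc.values.sum

-- ===== PORT B =====
-- B-side helper: body of the inner 'for j, c in enumerate(line)' scan (state = (start, cols))
def scanColB (st : Int × List Int) (q : Int × Char) : Int × List Int :=
  if q.2 == 'S' then (q.1, st.2)
  else if q.2 == '^' then (st.1, st.2 ++ [q.1])
  else st

def part2_alt (lines : List String) : Int :=
  let sr := lines.foldl
    (fun (sr : Int × List (List Int)) line =>
      let sc := (PySem.List.enumerate line.toList).foldl scanColB (sr.1, [])
      (sc.1, if sc.2.isEmpty then sr.2 else sr.2 ++ [sc.2]))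
    (0, [])
  -- reverse DP: w maps a column to the number of leaf particles one particle there produces
  -- through the remaining (lower) splitter rows; absent columns have multiplier 1
  let w := sr.2.reverse.foldl
    (fun w cols => cols.foldl
      (fun nw c => nw.insert c (w.getD (c - 1) 1 + w.getD (c + 1) 1)) w)
    (PySem.Dict.empty : PySem.Dict Int Int)
  w.getD sr.1 1

-- ===== PRECONDITION & SPEC =====
-- Pre_ excludes grids where some line has two '^' in adjacent columns: there A's result
-- depends on the accidental insertion order of its traverse_counts dict (adjacent splitters
-- can pop a count that another splitter of the same row has just augmented), while B splits
-- all counts of a row simultaneously; both values are defensible on that unspecified corner.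
def Pre_part2 (lines : List String) : Prop :=
  ∀ s ∈ lines, ∀ n < s.toList.length, ¬ (s.toList[n]? = some '^' ∧ s.toList[n+1]? = some '^')
instance (lines : List String) : Decidable (Pre_part2 lines) := by unfold Pre_part2; infer_instance

def pvWitness_part2 : List String := ["..S..", ".^.^.", "..^.."]

def Spec_part2 (lines : List String) (out : Int) : Prop := out = part2_alt lines
instance (lines : List String) (out : Int) : Decidable (Spec_part2 lines out) := by
  unfold Spec_part2; infer_instance

-- ===== CLAIM (what is proved, stated in full; the proofs are below) =====
def Claim_equal_part2 : Prop :=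
  ∀ (lines : List String), Dom_part2 lines → Pre_part2 lines → Spec_part2 lines (part2 lines)

-- ===== LEMMAS AND PROOFS =====

-- ---- proof-side vocabulary ----

-- the splitter columns of a row, as A collects them (ascending, no duplicates)
def colsOf (cs : List Char) : List Int :=
  ((PySem.List.enumerate cs).filter (fun p => p.2 == '^')).map Prod.fst

-- the (row, columns) pairs A's phase-2 loop effectively iterates over
def pairsOf (lines : List String) : List (Int × List Int) :=
  ((PySem.List.enumerate lines).filter
      (fun p => !((PySem.List.enumerate p.2.toList).filter (fun q => q.2 == '^')).isEmpty)).map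
    (fun p => (p.1, colsOf p.2.toList))

-- the splitter-column lists alone, in row order (what B's phase 1 collects)
def rowsOf (lines : List String) : List (List Int) :=
  (lines.filter
      (fun s => !((PySem.List.enumerate s.toList).filter (fun q => q.2 == '^')).isEmpty)).map
    (fun s => colsOf s.toList)

-- the S-columns of one line (proof-side name for both phase-1 scans' 'S' bookkeeping)
def sColsB (line : String) : List Int :=
  ((PySem.List.enumerate line.toList).filter (fun p => p.2 == 'S')).map Prod.fst

-- the start column both programs compute: the last 'S' in scan order, default 0
def startOf (lines : List String) : Int :=
  ((lines.flatMap sColsB).getLast?).getD 0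

-- A's phase-2 row body with the column list already looked up
def stepA (cols : List Int) (c : PySem.Dict Int Int) (kv : Int × Int) : PySem.Dict Int Int :=
  if cols.contains kv.1 then
    let c1 := c.insert (kv.1 - 1) (c.getD (kv.1 - 1) 0 + kv.2)
    let c2 := c1.insert (kv.1 + 1) (c1.getD (kv.1 + 1) 0 + kv.2)
    c2.erase kv.1
  else c

-- the idealised simultaneous split of one snapshot entry (proof-side middleman)
def fstep (cols : List Int) (nw : PySem.Dict Int Int) (kv : Int × Int) : PySem.Dict Int Int :=
  if cols.contains kv.1 then
    let n1 := nw.insert (kv.1 - 1) (nw.getD (kv.1 - 1) 0 + kv.2)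
    n1.insert (kv.1 + 1) (n1.getD (kv.1 + 1) 0 + kv.2)
  else nw.insert kv.1 (nw.getD kv.1 0 + kv.2)

def noAdj (cols : List Int) : Prop :=
  ∀ a : Int, cols.contains a = true → cols.contains (a + 1) = true → False

-- contribution of splitter splits of a snapshot to position j
def nContrib (cols : List Int) (L : List (Int × Int)) (j : Int) : Int :=
  (L.map (fun kv =>
    if cols.contains kv.1 = true ∧ (j = kv.1 - 1 ∨ j = kv.1 + 1) then kv.2 else 0)).sum

-- pass-through contribution of a snapshot to position j
def pContrib (cols : List Int) (L : List (Int × Int)) (j : Int) : Int :=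
  (L.map (fun kv =>
    if cols.contains kv.1 = false ∧ kv.1 = j then kv.2 else 0)).sum

-- the bisimulation between A's mutated dict and the simultaneous-split counter
def DEquiv (d d' : PySem.Dict Int Int) : Prop :=
  d.keys.Nodup ∧ d'.keys.Nodup ∧ (∀ j, d.contains j = d'.contains j) ∧
    (∀ j, d.getD j 0 = d'.getD j 0)

-- B's multiplier function: leaf count of one particle at column k above the given rows
def W : List (List Int) → Int → Int
  | [], _ => 1
  | cols :: L, k => if cols.contains k then W L (k - 1) + W L (k + 1) else W L k

-- weighted sum of a counts dict under a column weighting f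
def wsum (f : Int → Int) (d : PySem.Dict Int Int) : Int :=
  (d.items.map (fun kv => f kv.1 * kv.2)).sum

-- ---- Dict.erase facts ----
lemma find?_filter_ne (l : List (Int × Int)) (k j : Int) :
    (l.filter (fun p => !(p.1 == k))).find? (fun p => p.1 == j) =
      if j = k then none else l.find? (fun p => p.1 == j) := by
  induction l with
  | nil => simp
  | cons p t ih =>
    by_cases h1 : p.1 = k
    · by_cases h2 : j = k
      · simp [List.filter_cons, List.find?_cons, h1, h2, ih]
      · simp [List.filter_cons, List.find?_cons, h1, h2, ih,
          show (k == j) = false by simpa using fun hh => h2 hh.symm]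
    · by_cases h3 : p.1 = j
      · simp [List.filter_cons, List.find?_cons, h1, h3,
          show ¬j = k from fun hh => h1 (h3.trans hh)]
      · simp [List.filter_cons, List.find?_cons, h1, h3, ih]

lemma dict_get?_erase (d : PySem.Dict Int Int) (k j : Int) :
    (d.erase k).get? j = if j = k then none else d.get? j := by
  simp only [PySem.Dict.erase, PySem.Dict.get?, find?_filter_ne]
  split_ifs <;> rfl

lemma dict_getD_erase (d : PySem.Dict Int Int) (k j : Int) :
    (d.erase k).getD j 0 = if j = k then 0 else d.getD j 0 := by
  simp only [PySem.Dict.getD, dict_get?_erase]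
  split_ifs <;> rfl

lemma dict_contains_erase (d : PySem.Dict Int Int) (k j : Int) :
    (d.erase k).contains j = (!(j == k) && d.contains j) := by
  rw [PySem.Dict.contains_eq_isSome_get?, PySem.Dict.contains_eq_isSome_get?,
    dict_get?_erase]
  by_cases h : j = k <;> simp [h]

lemma dict_nodup_keys_erase (d : PySem.Dict Int Int) (k : Int) (h : d.keys.Nodup) :
    (d.erase k).keys.Nodup := by
  have : (d.erase k).keys.Sublist d.keys := by
    simp only [PySem.Dict.keys, PySem.Dict.erase]
    exact List.Sublist.map _ List.filter_sublist
  exact this.nodup h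

-- ---- contribution bookkeeping ----
lemma nContrib_cons (cols : List Int) (kv : Int × Int) (L : List (Int × Int)) (j : Int) :
    nContrib cols (kv :: L) j =
      (if cols.contains kv.1 = true ∧ (j = kv.1 - 1 ∨ j = kv.1 + 1) then kv.2 else 0) +
        nContrib cols L j := by
  simp [nContrib]

lemma nContrib_zero (cols : List Int) (L : List (Int × Int)) (j : Int)
    (h : noAdj cols) (hj : cols.contains j = true) : nContrib cols L j = 0 := by
  unfold nContrib
  apply List.sum_eq_zero
  intro x hx
  obtain ⟨kv, -, rfl⟩ := List.mem_map.mp hx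
  split_ifs with hc
  · rcases hc.2 with h1 | h1
    · exact absurd (h j hj (by rw [show j + 1 = kv.1 by omega]; exact hc.1)) not_false
    · exact absurd (h kv.1 hc.1 (by rw [show kv.1 + 1 = j by omega]; exact hj)) not_false
  · rfl

lemma nContrib_perm (cols : List Int) {L L' : List (Int × Int)} (h : L.Perm L') (j : Int) :
    nContrib cols L j = nContrib cols L' j :=
  (h.map _).sum_eq

-- ---- the A-side row characterisation ----
lemma stepA_of_not_mem (cols : List Int) (c : PySem.Dict Int Int) (kv : Int × Int)
    (hc : ¬ cols.contains kv.1 = true) : stepA cols c kv = c := by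
  have hc' : kv.1 ∉ cols := by simpa using hc
  simp [stepA, hc']

lemma getD_stepA (cols : List Int) (c : PySem.Dict Int Int) (kv : Int × Int) (j : Int)
    (hc : cols.contains kv.1 = true) :
    (stepA cols c kv).getD j 0 =
      if j = kv.1 then 0
      else if j = kv.1 - 1 ∨ j = kv.1 + 1 then c.getD j 0 + kv.2
      else c.getD j 0 := by
  unfold stepA
  simp only [hc, if_true, dict_getD_erase, PySem.Dict.getD_insert]
  split_ifs <;> (try subst_vars) <;> omega

lemma contains_stepA (cols : List Int) (c : PySem.Dict Int Int) (kv : Int × Int) (j : Int)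
    (hc : cols.contains kv.1 = true) :
    ((stepA cols c kv).contains j = true ↔
      ¬ j = kv.1 ∧ (j = kv.1 - 1 ∨ j = kv.1 + 1 ∨ c.contains j = true)) := by
  unfold stepA
  simp only [hc, if_true, dict_contains_erase, PySem.Dict.contains_insert]
  by_cases h1 : j = kv.1 <;> by_cases h2 : j = kv.1 - 1 <;> by_cases h3 : j = kv.1 + 1 <;>
    simp [h1, h2, h3] <;> omega

lemma noAdj_ne_of_both {cols : List Int} (h : noAdj cols) {a b : Int}
    (ha : cols.contains a = true) (hb : cols.contains b = true) :
    ¬ (a = b - 1 ∨ a = b + 1) := by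
  rintro (rfl | rfl)
  · exact h (b - 1) ha (by rw [show b - 1 + 1 = b by omega]; exact hb)
  · exact h b hb ha

lemma foldA_getD (cols : List Int) (h : noAdj cols) :
    ∀ (L : List (Int × Int)) (c : PySem.Dict Int Int),
      (L.map Prod.fst).Nodup →
      (∀ kv ∈ L, cols.contains kv.1 = true → c.getD kv.1 0 = kv.2) →
      ∀ j, (L.foldl (stepA cols) c).getD j 0 =
        if cols.contains j = true ∧ j ∈ L.map Prod.fst then 0
        else c.getD j 0 + nContrib cols L j := by
  intro L
  induction L with
  | nil => intro c _ _ j; simp [nContrib]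
  | cons kv t ih =>
    intro c hnd hsnap j
    have hnd' : (kv.1 :: t.map Prod.fst).Nodup := by simpa using hnd
    have hk1 : kv.1 ∉ t.map Prod.fst := (List.nodup_cons.mp hnd').1
    have hndt : (t.map Prod.fst).Nodup := (List.nodup_cons.mp hnd').2
    show (t.foldl (stepA cols) (stepA cols c kv)).getD j 0 = _
    by_cases hc : cols.contains kv.1 = true
    · have hsnap' : ∀ p ∈ t, cols.contains p.1 = true → (stepA cols c kv).getD p.1 0 = p.2 := by
        intro p hp hcp
        have hne : ¬ p.1 = kv.1 := fun e => hk1 (e ▸ List.mem_map_of_mem hp)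
        have hadj : ¬ (p.1 = kv.1 - 1 ∨ p.1 = kv.1 + 1) := noAdj_ne_of_both h hcp hc
        rw [getD_stepA cols c kv p.1 hc, if_neg hne, if_neg hadj]
        exact hsnap p (List.mem_cons_of_mem _ hp) hcp
      rw [ih (stepA cols c kv) hndt hsnap', nContrib_cons]
      have hv : c.getD kv.1 0 = kv.2 := hsnap kv (List.mem_cons_self ..) hc
      by_cases hcj : cols.contains j = true
      · have hz1 : nContrib cols t j = 0 := nContrib_zero cols t j h hcj
        have hhead : (if cols.contains kv.1 = true ∧ (j = kv.1 - 1 ∨ j = kv.1 + 1)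
            then kv.2 else 0) = 0 := by
          rw [if_neg]; rintro ⟨-, hor⟩; exact noAdj_ne_of_both h hcj hc hor
        rw [hz1, hhead]
        by_cases hmt : j ∈ t.map Prod.fst
        · rw [if_pos ⟨hcj, hmt⟩, if_pos ⟨hcj, by simp [hmt]⟩]
        · rw [if_neg (fun hh => hmt hh.2)]
          by_cases hjk : j = kv.1
          · rw [if_pos ⟨hcj, by simp [hjk]⟩, getD_stepA cols c kv j hc, if_pos hjk]
            omega
          · have : ¬ (cols.contains j = true ∧ j ∈ (kv :: t).map Prod.fst) := by
              rintro ⟨-, hm⟩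
              rcases List.mem_map.mp hm with ⟨p, hp, rfl⟩
              rcases List.mem_cons.mp hp with rfl | hp'
              · exact hjk rfl
              · exact hmt (List.mem_map_of_mem hp')
            rw [if_neg this, getD_stepA cols c kv j hc, if_neg hjk,
              if_neg (noAdj_ne_of_both h hcj hc)]
            omega
      · have hnc : ¬ (cols.contains j = true ∧ j ∈ t.map Prod.fst) := fun hh => hcj hh.1
        have hnc' : ¬ (cols.contains j = true ∧ j ∈ (kv :: t).map Prod.fst) := fun hh => hcj hh.1
        rw [if_neg hnc, if_neg hnc', getD_stepA cols c kv j hc]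
        have hjk : ¬ j = kv.1 := fun e => hcj (e ▸ hc)
        rw [if_neg hjk]
        simp only [hc, true_and]
        split_ifs <;> omega
    · rw [stepA_of_not_mem cols c kv hc,
        ih c hndt (fun p hp hcp => hsnap p (List.mem_cons_of_mem _ hp) hcp), nContrib_cons,
        if_neg (fun hh : cols.contains kv.1 = true ∧ _ => hc hh.1)]
      by_cases hcj : cols.contains j = true
      · by_cases hmt : j ∈ t.map Prod.fst
        · rw [if_pos ⟨hcj, hmt⟩, if_pos ⟨hcj, by simp [hmt]⟩]
        · rw [if_neg (fun hh => hmt hh.2), if_neg]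
          · omega
          · rintro ⟨-, hm⟩
            rcases List.mem_map.mp hm with ⟨p, hp, rfl⟩
            rcases List.mem_cons.mp hp with rfl | hp'
            · exact hc hcj
            · exact hmt (List.mem_map_of_mem hp')
      · rw [if_neg (fun hh => hcj hh.1), if_neg (fun hh => hcj hh.1)]
        omega

lemma foldA_contains (cols : List Int) (h : noAdj cols) :
    ∀ (L : List (Int × Int)) (c : PySem.Dict Int Int),
      (L.map Prod.fst).Nodup →
      ∀ j, ((L.foldl (stepA cols) c).contains j = true ↔
        ((c.contains j = true ∧ ¬ (cols.contains j = true ∧ j ∈ L.map Prod.fst)) ∨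
          ∃ kv ∈ L, cols.contains kv.1 = true ∧ (j = kv.1 - 1 ∨ j = kv.1 + 1))) := by
  intro L
  induction L with
  | nil => intro c _ j; simp
  | cons kv t ih =>
    intro c hnd j
    have hnd' : (kv.1 :: t.map Prod.fst).Nodup := by simpa using hnd
    have hndt : (t.map Prod.fst).Nodup := (List.nodup_cons.mp hnd').2
    show ((t.foldl (stepA cols) (stepA cols c kv)).contains j = true ↔ _)
    rw [ih (stepA cols c kv) hndt]
    by_cases hc : cols.contains kv.1 = true
    · rw [contains_stepA cols c kv j hc]
      have hCN : cols.contains j = true → ¬(j = kv.1 - 1 ∨ j = kv.1 + 1) := fun hcj =>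
        noAdj_ne_of_both h hcj hc
      have hMkC : j = kv.1 → cols.contains j = true := fun e => e ▸ hc
      constructor
      · rintro (⟨⟨hnk, hNA⟩, hnot⟩ | ⟨p, hp, hcp, hor⟩)
        · rcases hNA with hN | hN | hA
          · exact Or.inr ⟨kv, List.mem_cons_self .., hc, Or.inl hN⟩
          · exact Or.inr ⟨kv, List.mem_cons_self .., hc, Or.inr hN⟩
          · refine Or.inl ⟨hA, ?_⟩
            rintro ⟨hcj, hm⟩
            simp only [List.map_cons, List.mem_cons] at hm
            rcases hm with e | hm
            · exact hnk e
            · exact hnot ⟨hcj, hm⟩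
        · exact Or.inr ⟨p, List.mem_cons_of_mem _ hp, hcp, hor⟩
      · rintro (⟨hA, hnot⟩ | ⟨p, hp, hcp, hor⟩)
        · have hnk : ¬ j = kv.1 := fun e => hnot ⟨hMkC e, by simp [e]⟩
          exact Or.inl ⟨⟨hnk, Or.inr (Or.inr hA)⟩, fun ⟨hcj, hm⟩ => hnot ⟨hcj, by simp [hm]⟩⟩
        · rcases List.mem_cons.mp hp with rfl | hp'
          · refine Or.inl ⟨⟨by omega, hor.imp id Or.inl⟩, ?_⟩
            rintro ⟨hcj, -⟩; exact hCN hcj hor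
          · exact Or.inr ⟨p, hp', hcp, hor⟩
    · rw [stepA_of_not_mem cols c kv hc]
      have hMkC : j = kv.1 → ¬ cols.contains j = true := fun e => e ▸ hc
      constructor
      · rintro (⟨hA, hnot⟩ | ⟨p, hp, hcp, hor⟩)
        · refine Or.inl ⟨hA, ?_⟩
          rintro ⟨hcj, hm⟩
          simp only [List.map_cons, List.mem_cons] at hm
          rcases hm with e | hm
          · exact hMkC e hcj
          · exact hnot ⟨hcj, hm⟩
        · exact Or.inr ⟨p, List.mem_cons_of_mem _ hp, hcp, hor⟩
      · rintro (⟨hA, hnot⟩ | ⟨p, hp, hcp, hor⟩)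
        · exact Or.inl ⟨hA, fun ⟨hcj, hm⟩ => hnot ⟨hcj, by simp [hm]⟩⟩
        · rcases List.mem_cons.mp hp with rfl | hp'
          · exact absurd hcp hc
          · exact Or.inr ⟨p, hp', hcp, hor⟩

lemma nodup_keys_stepA (cols : List Int) (c : PySem.Dict Int Int) (kv : Int × Int)
    (h : c.keys.Nodup) : (stepA cols c kv).keys.Nodup := by
  unfold stepA
  split_ifs
  · exact dict_nodup_keys_erase _ _
      (PySem.Dict.nodup_keys_insert _ _ _ (PySem.Dict.nodup_keys_insert _ _ _ h))
  · exact h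

lemma nodup_keys_foldA (cols : List Int) (L : List (Int × Int)) (c : PySem.Dict Int Int)
    (h : c.keys.Nodup) : (L.foldl (stepA cols) c).keys.Nodup := by
  induction L generalizing c with
  | nil => exact h
  | cons kv t ih => exact ih _ (nodup_keys_stepA cols c kv h)

-- ---- the simultaneous-split row characterisation ----
lemma foldF_getD (cols : List Int) :
    ∀ (L : List (Int × Int)) (nw : PySem.Dict Int Int) (j : Int),
      (L.foldl (fstep cols) nw).getD j 0 =
        nw.getD j 0 + nContrib cols L j + pContrib cols L j := by
  intro L
  induction L with
  | nil => intro nw j; simp [nContrib, pContrib]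
  | cons kv t ih =>
    intro nw j
    show (t.foldl (fstep cols) (fstep cols nw kv)).getD j 0 = _
    rw [ih]
    have hn : nContrib cols (kv :: t) j =
        (if cols.contains kv.1 = true ∧ (j = kv.1 - 1 ∨ j = kv.1 + 1) then kv.2 else 0) +
          nContrib cols t j := nContrib_cons ..
    have hp : pContrib cols (kv :: t) j =
        (if cols.contains kv.1 = false ∧ kv.1 = j then kv.2 else 0) + pContrib cols t j := by
      simp [pContrib]
    rw [hn, hp]
    have hstep : (fstep cols nw kv).getD j 0 = nw.getD j 0 +
        (if cols.contains kv.1 = true ∧ (j = kv.1 - 1 ∨ j = kv.1 + 1) then kv.2 else 0) +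
        (if cols.contains kv.1 = false ∧ kv.1 = j then kv.2 else 0) := by
      unfold fstep
      by_cases hc : cols.contains kv.1 = true
      · simp only [hc, Bool.true_eq_false, if_true, true_and, false_and, if_false,
          PySem.Dict.getD_insert]
        split_ifs <;> (try subst_vars) <;> omega
      · simp only [Bool.not_eq_true] at hc
        simp only [hc, Bool.false_eq_true, if_false, false_and, true_and,
          PySem.Dict.getD_insert]
        split_ifs <;> (try subst_vars) <;> omega
    rw [hstep]; ring

lemma contains_fstep (cols : List Int) (nw : PySem.Dict Int Int) (kv : Int × Int) (j : Int) :
    ((fstep cols nw kv).contains j = true ↔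
      (nw.contains j = true ∨
        (if cols.contains kv.1 = true then j = kv.1 - 1 ∨ j = kv.1 + 1 else j = kv.1))) := by
  unfold fstep
  by_cases hc : cols.contains kv.1 = true
  · simp only [hc, if_pos]
    rw [PySem.Dict.contains_insert, PySem.Dict.contains_insert]
    simp only [hc, if_pos, Bool.or_eq_true, beq_iff_eq]
    constructor
    · rintro (h | h | h) <;> tauto
    · rintro (h | h | h) <;> tauto
  · simp only [Bool.not_eq_true] at hc
    simp only [hc, Bool.false_eq_true, if_false]
    rw [PySem.Dict.contains_insert]
    simp only [Bool.or_eq_true, beq_iff_eq]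
    tauto

lemma foldF_contains (cols : List Int) :
    ∀ (L : List (Int × Int)) (nw : PySem.Dict Int Int) (j : Int),
      ((L.foldl (fstep cols) nw).contains j = true ↔
        (nw.contains j = true ∨ ∃ kv ∈ L,
          (if cols.contains kv.1 = true then j = kv.1 - 1 ∨ j = kv.1 + 1 else j = kv.1))) := by
  intro L
  induction L with
  | nil => simp
  | cons kv t ih =>
    intro nw j
    show ((t.foldl (fstep cols) (fstep cols nw kv)).contains j = true ↔ _)
    rw [ih, contains_fstep]
    constructor
    · rintro ((h | h) | ⟨p, hp, h⟩)
      · exact Or.inl h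
      · exact Or.inr ⟨kv, by simp, h⟩
      · exact Or.inr ⟨p, by simp [hp], h⟩
    · rintro (h | ⟨p, hp, h⟩)
      · exact Or.inl (Or.inl h)
      · rcases List.mem_cons.mp hp with rfl | hp'
        · exact Or.inl (Or.inr h)
        · exact Or.inr ⟨p, hp', h⟩

lemma nodup_keys_fstep (cols : List Int) (nw : PySem.Dict Int Int) (kv : Int × Int)
    (h : nw.keys.Nodup) : (fstep cols nw kv).keys.Nodup := by
  unfold fstep
  split_ifs <;>
    first
      | exact PySem.Dict.nodup_keys_insert _ _ _ (PySem.Dict.nodup_keys_insert _ _ _ h)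
      | exact PySem.Dict.nodup_keys_insert _ _ _ h

lemma nodup_keys_foldF (cols : List Int) (L : List (Int × Int)) (nw : PySem.Dict Int Int)
    (h : nw.keys.Nodup) : (L.foldl (fstep cols) nw).keys.Nodup := by
  induction L generalizing nw with
  | nil => exact h
  | cons kv t ih => exact ih _ (nodup_keys_fstep cols nw kv h)

-- ---- DEquiv machinery ----
lemma keys_perm_of_DEquiv {d d' : PySem.Dict Int Int} (h : DEquiv d d') :
    d.keys.Perm d'.keys := by
  refine (List.perm_ext_iff_of_nodup h.1 h.2.1).mpr fun k => ?_
  rw [← PySem.Dict.contains_iff_mem_keys, ← PySem.Dict.contains_iff_mem_keys, h.2.2.1 k]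

lemma items_perm_of_DEquiv {d d' : PySem.Dict Int Int} (h : DEquiv d d') :
    d.items.Perm d'.items := by
  rw [PySem.Dict.items_eq_map_keys d h.1 0, PySem.Dict.items_eq_map_keys d' h.2.1 0]
  have : d.keys.map (fun k => (k, d.getD k 0)) = d.keys.map (fun k => (k, d'.getD k 0)) :=
    List.map_congr_left fun k _ => by rw [h.2.2.2 k]
  rw [this]
  exact (keys_perm_of_DEquiv h).map _

lemma pContrib_list (cols : List Int) :
    ∀ L : List (Int × Int), (L.map Prod.fst).Nodup → ∀ j,
      (L.map (fun kv => if cols.contains kv.1 = false ∧ kv.1 = j then kv.2 else 0)).sum =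
        if cols.contains j = true then 0
        else (Option.map Prod.snd (L.find? (fun p => p.1 == j))).getD 0 := by
  intro L
  induction L with
  | nil => intro _ j; split_ifs <;> simp
  | cons kv t ih =>
    intro hnd j
    have hnd' : (kv.1 :: t.map Prod.fst).Nodup := by simpa using hnd
    have hk1 : kv.1 ∉ t.map Prod.fst := (List.nodup_cons.mp hnd').1
    have hndt : (t.map Prod.fst).Nodup := (List.nodup_cons.mp hnd').2
    simp only [List.map_cons, List.sum_cons, List.find?_cons]
    by_cases e : kv.1 = j
    · have htail : (t.map (fun kv => if cols.contains kv.1 = false ∧ kv.1 = j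
          then kv.2 else 0)).sum = 0 := by
        apply List.sum_eq_zero
        intro x hx
        obtain ⟨p, hp, rfl⟩ := List.mem_map.mp hx
        rw [if_neg]
        rintro ⟨-, rfl⟩
        exact hk1 (e ▸ List.mem_map_of_mem hp)
      rw [htail, show (kv.1 == j) = true by simpa using e]
      by_cases hcj : cols.contains j = true
      · rw [if_pos hcj, if_neg (fun hh => by rw [e] at hh; exact absurd (by simpa using hcj : j ∈ cols) (by simpa using hh.1))]
        simp
      · rw [if_neg hcj, if_pos ⟨by rw [e]; simpa using hcj, e⟩]
        simp
    · rw [show (kv.1 == j) = false by simpa using e, if_neg (fun hh => e hh.2)]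
      simpa using ih hndt j

lemma pContrib_eq (cols : List Int) (d : PySem.Dict Int Int) (hnd : d.keys.Nodup) (j : Int) :
    pContrib cols d.items j = if cols.contains j = true then 0 else d.getD j 0 := by
  rw [pContrib, pContrib_list cols d.items hnd j]
  rfl

lemma transfer_key {d d' : PySem.Dict Int Int} (hcont : ∀ j, d.contains j = d'.contains j)
    {kv : Int × Int} (hkv : kv ∈ d.items) : ∃ kv' ∈ d'.items, kv'.1 = kv.1 := by
  have h1 : d.contains kv.1 = true := List.any_eq_true.mpr ⟨kv, hkv, by simp⟩
  have h2 : d'.contains kv.1 = true := (hcont kv.1) ▸ h1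
  obtain ⟨kv', hkv', he⟩ := List.any_eq_true.mp h2
  exact ⟨kv', hkv', by simpa using he⟩

-- one row: A's snapshot mutation and the simultaneous split stay in bisimulation
lemma row_DEquiv (cols : List Int) (h : noAdj cols) {d d' : PySem.Dict Int Int}
    (hd : DEquiv d d') :
    DEquiv (d.items.foldl (stepA cols) d) (d'.items.foldl (fstep cols) PySem.Dict.empty) := by
  obtain ⟨hnd, hnd', hcont, hgd⟩ := hd
  have hndE : (PySem.Dict.empty : PySem.Dict Int Int).keys.Nodup := by
    simp [PySem.Dict.empty, PySem.Dict.keys]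
  refine ⟨nodup_keys_foldA cols d.items d hnd, nodup_keys_foldF cols d'.items _ hndE, ?_, ?_⟩
  · intro j
    rw [Bool.eq_iff_iff, foldA_contains cols h d.items d hnd j, foldF_contains cols d'.items _ j]
    have hE : (PySem.Dict.empty : PySem.Dict Int Int).contains j = true ↔ False := by
      simp [PySem.Dict.empty, PySem.Dict.contains]
    constructor
    · rintro (⟨hcj, hnot⟩ | ⟨kv, hkv, hckv, hN⟩)
      · have hcolsj : ¬ cols.contains j = true := fun hcols =>
          hnot ⟨hcols, (PySem.Dict.contains_iff_mem_keys d j).mp hcj⟩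
        have hc' : d'.contains j = true := (hcont j) ▸ hcj
        obtain ⟨kv', hkv', he⟩ := List.any_eq_true.mp hc'
        refine Or.inr ⟨kv', hkv', ?_⟩
        have he' : kv'.1 = j := by simpa using he
        rw [he', if_neg hcolsj]
      · obtain ⟨kv', hkv', he⟩ := transfer_key hcont hkv
        refine Or.inr ⟨kv', hkv', ?_⟩
        rw [he, if_pos hckv]
        exact hN
    · rintro (hF | ⟨kv, hkv, hif⟩)
      · exact absurd hF (hE.mp · )
      · by_cases hckv : cols.contains kv.1 = true
        · rw [if_pos hckv] at hif
          obtain ⟨kv', hkv', he⟩ := transfer_key (fun j => (hcont j).symm) hkv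
          exact Or.inr ⟨kv', hkv', he ▸ hckv, he ▸ hif⟩
        · rw [if_neg hckv] at hif
          have hcj' : d'.contains j = true := hif ▸ List.any_eq_true.mpr ⟨kv, hkv, by simp⟩
          have hcj : d.contains j = true := (hcont j) ▸ hcj'
          refine Or.inl ⟨hcj, ?_⟩
          rintro ⟨hcols, -⟩
          exact hckv (hif ▸ hcols)
  · intro j
    rw [foldA_getD cols h d.items d hnd
        (fun kv hkv _ => PySem.Dict.getD_of_mem_items d hkv hnd 0) j,
      foldF_getD cols d'.items _ j,
      nContrib_perm cols (items_perm_of_DEquiv ⟨hnd, hnd', hcont, hgd⟩) j,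
      pContrib_eq cols d' hnd' j]
    have hgE : (PySem.Dict.empty : PySem.Dict Int Int).getD j 0 = 0 := rfl
    rw [hgE]
    by_cases hcj : cols.contains j = true
    · rw [if_pos hcj, nContrib_zero cols d'.items j h hcj]
      by_cases hmem : j ∈ List.map Prod.fst d.items
      · rw [if_pos ⟨hcj, hmem⟩]; ring
      · rw [if_neg (fun hh => hmem hh.2),
          PySem.Dict.getD_of_not_contains d 0 (by
            rw [← Bool.not_eq_true]
            exact fun hc => hmem ((PySem.Dict.contains_iff_mem_keys d j).mp hc))]
        ring
    · rw [if_neg (fun hh => hcj hh.1), if_neg hcj, hgd j]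
      ring

-- all rows
lemma fold_rows_DEquiv (pairs : List (Int × List Int)) (hadj : ∀ p ∈ pairs, noAdj p.2) :
    ∀ {d d' : PySem.Dict Int Int}, DEquiv d d' →
    DEquiv (pairs.foldl (fun tc p => tc.items.foldl (stepA p.2) tc) d)
      (pairs.foldl (fun tc p => tc.items.foldl (fstep p.2) PySem.Dict.empty) d') := by
  induction pairs with
  | nil => intro d d' hd; exact hd
  | cons p t ih =>
    intro d d' hd
    exact ih (fun q hq => hadj q (List.mem_cons_of_mem _ hq))
      (row_DEquiv p.2 (hadj p (List.mem_cons_self ..)) hd)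

lemma sum_values_of_DEquiv {d d' : PySem.Dict Int Int} (h : DEquiv d d') :
    d.values.sum = d'.values.sum := by
  simp only [PySem.Dict.values]
  exact ((items_perm_of_DEquiv h).map _).sum_eq

-- ---- from the simultaneous forward fold to B's multiplier function W ----
lemma assoc_replace_sum (f : Int → Int) (k v w0 : Int) :
    ∀ l : List (Int × Int), (l.map Prod.fst).Nodup → (k, w0) ∈ l →
      ((l.map (fun p => if p.1 == k then (k, w0 + v) else p)).map
          (fun kv => f kv.1 * kv.2)).sum =
        (l.map (fun kv => f kv.1 * kv.2)).sum + f k * v := by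
  intro l
  induction l with
  | nil => intro _ h; simp at h
  | cons p t ih =>
    intro hnd hmem
    have hnd' : (p.1 :: t.map Prod.fst).Nodup := by simpa using hnd
    have hp1 : p.1 ∉ t.map Prod.fst := (List.nodup_cons.mp hnd').1
    have hndt : (t.map Prod.fst).Nodup := (List.nodup_cons.mp hnd').2
    by_cases hk : p.1 = k
    · have hp2 : p = (k, w0) := by
        rcases List.mem_cons.mp hmem with h | h
        · exact h.symm
        · exact absurd (show p.1 ∈ t.map Prod.fst by
            rw [hk]; exact List.mem_map_of_mem h) hp1
      have htail : t.map (fun q => if q.1 == k then (k, w0 + v) else q) = t := by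
        have := List.map_congr_left (l := t)
          (f := fun q : Int × Int => if q.1 == k then (k, w0 + v) else q) (g := id)
          (fun q hq => by
            have hne : (q.1 == k) = false := by
              simp only [beq_eq_false_iff_ne, ne_eq]
              exact fun e => hp1 (by rw [hk, ← e]; exact List.mem_map_of_mem hq)
            simp [hne])
        simpa using this
      rw [hp2]
      simp only [List.map_cons, List.sum_cons]
      rw [htail, if_pos (show ((((k, w0) : Int × Int).1 == k) = true) from beq_self_eq_true k)]
      ring
    · have hmem' : (k, w0) ∈ t := by
        rcases List.mem_cons.mp hmem with h | h
        · exact absurd (by rw [← h]) hk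
        · exact h
      simp only [List.map_cons, show (p.1 == k) = false by simpa using hk, Bool.false_eq_true,
        if_false, List.sum_cons, ih hndt hmem']
      ring

lemma wsum_insert_add (f : Int → Int) (nw : PySem.Dict Int Int) (k v : Int)
    (hnd : nw.keys.Nodup) :
    wsum f (nw.insert k (nw.getD k 0 + v)) = wsum f nw + f k * v := by
  by_cases hc : nw.contains k = true
  · have hsome : nw.get? k = some (nw.getD k 0) := by
      cases hg : nw.get? k with
      | none =>
        rw [PySem.Dict.contains_eq_isSome_get?, hg] at hc
        simp at hc
      | some w0 =>
        rw [PySem.Dict.getD_of_get?_eq_some nw 0 hg]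
    have hmem : (k, nw.getD k 0) ∈ nw.items :=
      PySem.Dict.mem_items_of_get?_eq_some nw hsome
    rw [wsum, PySem.Dict.items_insert_of_contains nw _ hc]
    have := assoc_replace_sum f k v (nw.getD k 0) nw.items hnd hmem
    simpa [wsum] using this
  · rw [wsum, PySem.Dict.items_insert_of_not_contains _ _ (by simpa using hc),
      PySem.Dict.getD_of_not_contains nw 0 (by simpa using hc)]
    simp [wsum]

lemma wsum_fstep (f : Int → Int) (cols : List Int) (nw : PySem.Dict Int Int) (kv : Int × Int)
    (hnd : nw.keys.Nodup) :
    wsum f (fstep cols nw kv) = wsum f nw +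
      (if cols.contains kv.1 then f (kv.1 - 1) + f (kv.1 + 1) else f kv.1) * kv.2 := by
  unfold fstep
  by_cases hc : cols.contains kv.1 = true
  · simp only [hc, if_pos]
    rw [wsum_insert_add f _ _ _ (PySem.Dict.nodup_keys_insert _ _ _ hnd),
      wsum_insert_add f _ _ _ hnd]
    ring
  · simp only [hc, Bool.false_eq_true, if_false]
    rw [wsum_insert_add f _ _ _ hnd]

lemma wsum_fold_fstep (f : Int → Int) (cols : List Int) :
    ∀ (L : List (Int × Int)) (nw : PySem.Dict Int Int), nw.keys.Nodup →
      wsum f (L.foldl (fstep cols) nw) = wsum f nw +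
        (L.map (fun kv =>
          (if cols.contains kv.1 then f (kv.1 - 1) + f (kv.1 + 1) else f kv.1) * kv.2)).sum := by
  intro L
  induction L with
  | nil => intro nw _; simp
  | cons kv t ih =>
    intro nw hnd
    show wsum f (t.foldl (fstep cols) (fstep cols nw kv)) = _
    rw [ih _ (nodup_keys_fstep cols nw kv hnd), wsum_fstep f cols nw kv hnd]
    simp only [List.map_cons, List.sum_cons]
    ring

lemma forward_eq_W :
    ∀ (pairs : List (Int × List Int)) (d : PySem.Dict Int Int), d.keys.Nodup →
      (pairs.foldl (fun tc p => tc.items.foldl (fstep p.2) PySem.Dict.empty) d).values.sum =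
        wsum (W (pairs.map Prod.snd)) d := by
  intro pairs
  induction pairs with
  | nil =>
    intro d _
    simp [wsum, PySem.Dict.values, W]
  | cons p t ih =>
    intro d hnd
    have hndE : (PySem.Dict.empty : PySem.Dict Int Int).keys.Nodup := by
      simp [PySem.Dict.empty, PySem.Dict.keys]
    show (t.foldl _ (d.items.foldl (fstep p.2) PySem.Dict.empty)).values.sum = _
    rw [ih _ (nodup_keys_foldF p.2 d.items _ hndE),
      wsum_fold_fstep (W (t.map Prod.snd)) p.2 d.items PySem.Dict.empty hndE]
    have hE : wsum (W (t.map Prod.snd)) PySem.Dict.empty = 0 := rfl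
    rw [hE]
    show _ = (d.items.map (fun kv => W (p.2 :: t.map Prod.snd) kv.1 * kv.2)).sum
    rw [zero_add]
    apply congrArg
    apply List.map_congr_left
    intro kv _
    show (if p.2.contains kv.1 then _ else _) * kv.2 = _
    rw [show W (p.2 :: t.map Prod.snd) kv.1 =
      if p.2.contains kv.1 then W (t.map Prod.snd) (kv.1 - 1) + W (t.map Prod.snd) (kv.1 + 1)
      else W (t.map Prod.snd) kv.1 from rfl]

-- ---- phase 1: characterising A's splitters dict and start position ----
lemma getLastD_cons (x : Int) (xs : List Int) (s : Int) :
    ((x :: xs).getLast?).getD s = (xs.getLast?).getD x := by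
  cases xs with
  | nil => rfl
  | cons y t =>
    rw [List.getLast?_cons_cons]
    cases h : (y :: t).getLast? with
    | none => simp at h
    | some a => rfl

lemma getLastD_append (a b : List Int) (s : Int) :
    (((a ++ b).getLast?).getD s) = ((b.getLast?).getD ((a.getLast?).getD s)) := by
  induction a generalizing s with
  | nil => simp
  | cons x t ih => rw [List.cons_append, getLastD_cons, getLastD_cons, ih]

lemma scan_inner (i : Int) :
    ∀ (l : List (Int × Char)) (sp : PySem.Dict Int (List Int)) (s : Int),
      l.foldl (fun st p => scanChar i st p.1 p.2) (sp, s) =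
        ((if (l.filter (fun p => p.2 == '^')).isEmpty then sp
          else sp.insert i (sp.getD i [] ++ ((l.filter (fun p => p.2 == '^')).map Prod.fst))),
         (((l.filter (fun p => p.2 == 'S')).map Prod.fst).getLast?).getD s) := by
  intro l
  induction l with
  | nil => intro sp s; simp
  | cons p t ih =>
    intro sp s
    show (t.foldl (fun st q => scanChar i st q.1 q.2) (scanChar i (sp, s) p.1 p.2)) = _
    by_cases hS : p.2 = 'S'
    · have hstep : scanChar i (sp, s) p.1 p.2 = (sp, p.1) := by simp [scanChar, hS]
      have e1 : ((p :: t).filter (fun q => q.2 == '^')) = t.filter (fun q => q.2 == '^') := by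
        simp [List.filter_cons, hS]
      have e2 : ((p :: t).filter (fun q => q.2 == 'S')) =
          p :: t.filter (fun q => q.2 == 'S') := by
        simp [List.filter_cons, hS]
      rw [hstep, ih sp p.1, e1, e2, List.map_cons, getLastD_cons]
    · by_cases hC : p.2 = '^'
      · have hstep : scanChar i (sp, s) p.1 p.2 =
            (sp.insert i (sp.getD i [] ++ [p.1]), s) := by
          by_cases hcont : sp.contains i = true
          · simp [scanChar, hS, hC, hcont]
          · have : sp.getD i [] = [] :=
              PySem.Dict.getD_of_not_contains sp [] (by simpa using hcont)
            simp [scanChar, hS, hC, hcont, this]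
        have e1 : ((p :: t).filter (fun q => q.2 == '^')) =
            p :: t.filter (fun q => q.2 == '^') := by
          simp [List.filter_cons, hC]
        have e2 : ((p :: t).filter (fun q => q.2 == 'S')) = t.filter (fun q => q.2 == 'S') := by
          simp [List.filter_cons, hC, hS]
        rw [hstep, ih _ s, e1, e2]
        by_cases hrest : (t.filter (fun q => q.2 == '^')).isEmpty = true
        · have ht : t.filter (fun q => q.2 == '^') = [] := by simpa using hrest
          simp [ht]
        · have hrf : (t.filter (fun q => q.2 == '^')).isEmpty = false := by
            simpa using hrest
          simp only [hrf, Bool.false_eq_true, if_false, List.isEmpty_cons, List.map_cons,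
            PySem.Dict.getD_insert_self, PySem.Dict.insert_insert_self]
          simp [List.append_assoc]
      · have hstep : scanChar i (sp, s) p.1 p.2 = (sp, s) := by
          simp [scanChar, hS, hC]
        have e1 : ((p :: t).filter (fun q => q.2 == '^')) = t.filter (fun q => q.2 == '^') := by
          simp [List.filter_cons, hC]
        have e2 : ((p :: t).filter (fun q => q.2 == 'S')) = t.filter (fun q => q.2 == 'S') := by
          simp [List.filter_cons, hS]
        rw [hstep, ih sp s, e1, e2]

lemma scan_outer :
    ∀ (ls : List (Int × String)) (sp : PySem.Dict Int (List Int)) (s : Int),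
      (∀ p ∈ ls, sp.contains p.1 = false) → (ls.map Prod.fst).Nodup →
      ls.foldl (fun st p =>
          (PySem.List.enumerate p.2.toList).foldl
            (fun st q => scanChar p.1 st q.1 q.2) st) (sp, s) =
        (PySem.Dict.mk (sp.items ++
            (((ls.filter (fun p => !((PySem.List.enumerate p.2.toList).filter
                (fun q => q.2 == '^')).isEmpty)).map (fun p => (p.1, colsOf p.2.toList))))),
         ((ls.flatMap (fun p => sColsB p.2)).getLast?).getD s) := by
  intro ls
  induction ls with
  | nil =>
    intro sp s _ _
    simp only [List.foldl_nil, List.filter_nil, List.map_nil, List.append_nil,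
      List.flatMap_nil, List.getLast?_nil]
    rfl
  | cons p t ih =>
    intro sp s hfresh hnd
    have hndt : (t.map Prod.fst).Nodup := (List.nodup_cons.mp (by simpa using hnd)).2
    have hp1 : p.1 ∉ t.map Prod.fst := (List.nodup_cons.mp (by simpa using hnd)).1
    have hfp : sp.contains p.1 = false := hfresh p (List.mem_cons_self ..)
    rw [List.foldl_cons, scan_inner p.1 (PySem.List.enumerate p.2.toList) sp s]
    by_cases hcar : ((PySem.List.enumerate p.2.toList).filter
        (fun q => q.2 == '^')).isEmpty = true
    · rw [if_pos hcar,
        ih sp _ (fun q hq => hfresh q (List.mem_cons_of_mem _ hq)) hndt]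
      have e1 : ((p :: t).filter (fun p => !((PySem.List.enumerate p.2.toList).filter
          (fun q => q.2 == '^')).isEmpty)) =
          t.filter (fun p => !((PySem.List.enumerate p.2.toList).filter
            (fun q => q.2 == '^')).isEmpty) := by
        simp [List.filter_cons, hcar]
      rw [e1, List.flatMap_cons, getLastD_append]
      rfl
    · rw [if_neg hcar,
        ih _ _ (fun q hq => by
          rw [PySem.Dict.contains_insert]
          have : ¬ q.1 = p.1 := fun e => hp1 (e ▸ List.mem_map_of_mem hq)
          simp [this, hfresh q (List.mem_cons_of_mem _ hq)]) hndt]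
      have e1 : ((p :: t).filter (fun p => !((PySem.List.enumerate p.2.toList).filter
          (fun q => q.2 == '^')).isEmpty)) =
          p :: t.filter (fun p => !((PySem.List.enumerate p.2.toList).filter
            (fun q => q.2 == '^')).isEmpty) := by
        simp [List.filter_cons, hcar]
      have e2 : (sp.insert p.1 (sp.getD p.1 [] ++ ((PySem.List.enumerate p.2.toList).filter
          (fun q => q.2 == '^')).map Prod.fst)).items =
          sp.items ++ [(p.1, colsOf p.2.toList)] := by
        rw [PySem.Dict.getD_of_not_contains sp [] hfp,
          PySem.Dict.items_insert_of_not_contains sp _ hfp]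
        rfl
      rw [e1, e2, List.map_cons, List.flatMap_cons, getLastD_append, List.append_assoc]
      rfl

-- ---- small facts about pairsOf / rowsOf ----
lemma flatMap_enumerate_snd (lines : List String) :
    (PySem.List.enumerate lines).flatMap (fun p => sColsB p.2) = lines.flatMap sColsB := by
  conv_rhs => rw [← PySem.List.map_snd_enumerate lines 0]
  rw [List.flatMap_map]

lemma pairsOf_pairwise (lines : List String) :
    (pairsOf lines).Pairwise (fun a b => a.1 < b.1) := by
  unfold pairsOf
  rw [List.pairwise_map]
  exact List.Pairwise.sublist List.filter_sublist (PySem.List.pairwise_lt_enumerate lines 0)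

lemma pairsOf_keys_nodup (lines : List String) : ((pairsOf lines).map Prod.fst).Nodup := by
  have h := (pairsOf_pairwise lines).imp (fun {a b} h => ne_of_lt h)
  exact List.Pairwise.map _ (fun a b h => h) h

lemma pairsOf_mem_bound (lines : List String) {p : Int × List Int} (hp : p ∈ pairsOf lines) :
    0 ≤ p.1 ∧ p.1 < (lines.length : Int) := by
  unfold pairsOf at hp
  obtain ⟨q, hq, rfl⟩ := List.mem_map.mp hp
  obtain ⟨m, hm, he⟩ :=
    (PySem.List.mem_enumerate_iff lines 0 q).mp (List.mem_filter.mp hq).1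
  rw [he]; simp; omega

lemma pairsOf_snd (lines : List String) : (pairsOf lines).map Prod.snd = rowsOf lines := by
  unfold pairsOf rowsOf
  rw [List.map_map]
  conv_rhs => rw [← PySem.List.map_snd_enumerate lines 0]
  rw [List.filter_map, List.map_map]
  rfl

-- ---- phase 2 of port A: dead rows vanish, live rows become stepA folds ----
lemma rowA_id (sp : PySem.Dict Int (List Int)) (i : Int) (tc : PySem.Dict Int Int)
    (h : sp.get? i = none) : tc.items.foldl (rowStepA sp i) tc = tc := by
  rw [PySem.List.foldl_congr_mem tc.items (rowStepA sp i) (fun c _ => c) tc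
    (fun acc x _ => by simp [rowStepA, h])]
  exact PySem.List.foldl_ignore tc.items tc

lemma rowA_some (sp : PySem.Dict Int (List Int)) (i : Int) (cols : List Int)
    (tc : PySem.Dict Int Int) (h : sp.get? i = some cols) :
    tc.items.foldl (rowStepA sp i) tc = tc.items.foldl (stepA cols) tc :=
  PySem.List.foldl_congr_mem tc.items _ _ tc (fun acc x _ => by simp [rowStepA, stepA, h])

lemma phase2A (lines : List String) (tc0 : PySem.Dict Int Int) :
    (PySem.List.pyRange 0 (PySem.List.len lines)).foldl
      (fun tc i => tc.items.foldl (rowStepA (PySem.Dict.mk (pairsOf lines)) i) tc) tc0 =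
    (pairsOf lines).foldl (fun tc p => tc.items.foldl (stepA p.2) tc) tc0 := by
  have hnd : (PySem.Dict.mk (pairsOf lines)).keys.Nodup := by
    rw [PySem.Dict.keys_mk]; exact pairsOf_keys_nodup lines
  rw [PySem.List.foldl_congr_mem _ _
      (fun tc i => if (PySem.Dict.mk (pairsOf lines)).contains i then
        tc.items.foldl (rowStepA (PySem.Dict.mk (pairsOf lines)) i) tc else tc) tc0
    (fun acc i _ => by
      dsimp only
      by_cases hc : (PySem.Dict.mk (pairsOf lines)).contains i = true
      · rw [if_pos hc]
      · rw [if_neg hc,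
          rowA_id _ i acc ((PySem.Dict.get?_eq_none_iff_contains _ i).mpr
            (Bool.eq_false_iff.mpr hc))]),
    PySem.List.foldl_if_eq_foldl_filter (fun i => (PySem.Dict.mk (pairsOf lines)).contains i)
      (fun tc i => tc.items.foldl (rowStepA (PySem.Dict.mk (pairsOf lines)) i) tc) _ tc0]
  have hrange : (PySem.List.enumerate lines).map Prod.fst =
      PySem.List.pyRange 0 (PySem.List.len lines) := by
    rw [PySem.List.map_fst_enumerate]; simp [PySem.List.len]
  have hfil : (PySem.List.pyRange 0 (PySem.List.len lines)).filter
      (fun i => (PySem.Dict.mk (pairsOf lines)).contains i) =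
      (PySem.Dict.mk (pairsOf lines)).keys := by
    have hpw1 : ((PySem.List.pyRange 0 (PySem.List.len lines)).filter
        (fun i => (PySem.Dict.mk (pairsOf lines)).contains i)).Pairwise (· < ·) := by
      refine List.Pairwise.sublist List.filter_sublist ?_
      rw [← hrange]
      exact List.Pairwise.map _ (fun a b h => h) (PySem.List.pairwise_lt_enumerate lines 0)
    have hpw2 : (PySem.Dict.mk (pairsOf lines)).keys.Pairwise (· < ·) := by
      rw [PySem.Dict.keys_mk]
      exact List.Pairwise.map _ (fun a b h => h) (pairsOf_pairwise lines)
    refine List.eq_of_perm_of_sorted (fun a b _ _ h1 h2 => by omega) hpw1 hpw2 ?_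
    refine (List.perm_ext_iff_of_nodup (hpw1.imp ne_of_lt) (hpw2.imp ne_of_lt)).mpr fun k => ?_
    rw [List.mem_filter]
    constructor
    · rintro ⟨-, hc⟩
      exact (PySem.Dict.contains_iff_mem_keys _ k).mp (by simpa using hc)
    · intro hk
      refine ⟨?_, by simpa using (PySem.Dict.contains_iff_mem_keys _ k).mpr hk⟩
      rw [PySem.Dict.keys_mk] at hk
      obtain ⟨p, hp, rfl⟩ := List.mem_map.mp hk
      have hb := pairsOf_mem_bound lines hp
      exact PySem.List.mem_pyRange_one.mpr (by simp only [PySem.List.len]; omega)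
  rw [hfil, PySem.Dict.keys_mk, List.foldl_map]
  exact PySem.List.foldl_congr_mem _ _ _ tc0 (fun acc p hp =>
    rowA_some _ p.1 p.2 acc (PySem.Dict.get?_of_mem_items _ hp hnd))

-- ---- assembling port A ----
lemma part2_eq_W (lines : List String) (h : ∀ p ∈ pairsOf lines, noAdj p.2) :
    part2 lines = W (rowsOf lines) (startOf lines) := by
  unfold part2
  have houter :
      (PySem.List.pyRange 0 (PySem.List.len lines)).foldl
        (fun st i =>
          let line := PySem.List.pyGetD lines i ""
          (PySem.List.pyRange 0 (PySem.Str.len line)).foldl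
            (fun st j => scanChar i st j (PySem.List.pyGetD line.toList j ' ')) st)
        (PySem.Dict.empty, 0) =
      (PySem.List.enumerate lines).foldl (fun st p =>
        (PySem.List.enumerate p.2.toList).foldl (fun st q => scanChar p.1 st q.1 q.2) st)
        (PySem.Dict.empty, 0) := by
    rw [PySem.List.enumerate_eq_map_pyRange lines "", List.foldl_map]
    refine PySem.List.foldl_congr_mem _ _ _ _ (fun acc i _ => ?_)
    show (PySem.List.pyRange 0 (PySem.Str.len (PySem.List.pyGetD lines i ""))).foldl
        (fun st j => scanChar i st j
          (PySem.List.pyGetD (PySem.List.pyGetD lines i "").toList j ' ')) acc = _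
    dsimp only
    rw [PySem.List.enumerate_eq_map_pyRange (PySem.List.pyGetD lines i "").toList ' ',
      List.foldl_map,
      show PySem.Str.len (PySem.List.pyGetD lines i "") =
        PySem.List.len (PySem.List.pyGetD lines i "").toList from by
          simp [PySem.Str.len_eq, PySem.List.len]]
  rw [houter,
    scan_outer (PySem.List.enumerate lines) PySem.Dict.empty 0 (fun p _ => rfl)
      (List.Pairwise.map Prod.fst (fun a b h => ne_of_lt h)
        (PySem.List.pairwise_lt_enumerate lines 0))]
  simp only
  rw [flatMap_enumerate_snd]
  have hsorted : PySem.List.sorted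
      (PySem.Dict.mk ((PySem.Dict.empty : PySem.Dict Int (List Int)).items ++
        (((PySem.List.enumerate lines).filter (fun p => !((PySem.List.enumerate p.2.toList).filter
          (fun q => q.2 == '^')).isEmpty)).map (fun p => (p.1, colsOf p.2.toList))))).items
      (fun p => p.1) = pairsOf lines :=
    PySem.List.sorted_eq_of_perm_of_pairwise_lt _ _ _ (List.Perm.refl _)
      (pairsOf_pairwise lines)
  rw [hsorted, phase2A lines,
    show ((lines.flatMap sColsB).getLast?).getD 0 = startOf lines from rfl]
  have hnd0 : ((PySem.Dict.empty : PySem.Dict Int Int).insert (startOf lines) 1).keys.Nodup :=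
    PySem.Dict.nodup_keys_insert _ _ _ (by simp [PySem.Dict.empty, PySem.Dict.keys])
  rw [sum_values_of_DEquiv (fold_rows_DEquiv (pairsOf lines) h
      ⟨hnd0, hnd0, fun _ => rfl, fun _ => rfl⟩),
    forward_eq_W (pairsOf lines) _ hnd0, pairsOf_snd]
  show wsum (W (rowsOf lines)) (PySem.Dict.mk [(startOf lines, 1)]) = _
  simp [wsum]

-- ---- assembling port B ----
lemma scanB_inner :
    ∀ (l : List (Int × Char)) (s : Int) (acc : List Int),
      l.foldl scanColB (s, acc) =
        ((((l.filter (fun p => p.2 == 'S')).map Prod.fst).getLast?).getD s,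
         acc ++ (l.filter (fun p => p.2 == '^')).map Prod.fst) := by
  intro l
  induction l with
  | nil => intro s acc; simp
  | cons p t ih =>
    intro s acc
    show t.foldl scanColB (scanColB (s, acc) p) = _
    by_cases hS : p.2 = 'S'
    · have hstep : scanColB (s, acc) p = (p.1, acc) := by simp [scanColB, hS]
      rw [hstep, ih p.1 acc]
      simp [List.filter_cons, hS, getLastD_cons]
    · by_cases hC : p.2 = '^'
      · have hstep : scanColB (s, acc) p = (s, acc ++ [p.1]) := by simp [scanColB, hS, hC]
        rw [hstep, ih s (acc ++ [p.1])]
        simp [List.filter_cons, hS, hC, List.append_assoc]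
      · have hstep : scanColB (s, acc) p = (s, acc) := by simp [scanColB, hS, hC]
        rw [hstep, ih s acc]
        simp [List.filter_cons, hS, hC]

lemma scanB_outer :
    ∀ (ls : List String) (s : Int) (rows : List (List Int)),
      ls.foldl (fun (sr : Int × List (List Int)) line =>
          let sc := (PySem.List.enumerate line.toList).foldl scanColB (sr.1, [])
          (sc.1, if sc.2.isEmpty then sr.2 else sr.2 ++ [sc.2])) (s, rows) =
        (((ls.flatMap sColsB).getLast?).getD s, rows ++ rowsOf ls) := by
  intro ls
  induction ls with
  | nil => intro s rows; simp [rowsOf]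
  | cons line t ih =>
    intro s rows
    rw [List.foldl_cons]
    simp only [scanB_inner (PySem.List.enumerate line.toList) s [], List.nil_append]
    rw [ih]
    have hrows : rowsOf (line :: t) =
        (if ((PySem.List.enumerate line.toList).filter (fun q => q.2 == '^')).isEmpty
          then [] else [colsOf line.toList]) ++ rowsOf t := by
      unfold rowsOf
      rw [List.filter_cons]
      by_cases hc : ((PySem.List.enumerate line.toList).filter (fun q => q.2 == '^')).isEmpty
      · simp [hc]
      · simp [hc]
    have hemp : (((PySem.List.enumerate line.toList).filter
        (fun q => q.2 == '^')).map Prod.fst).isEmpty =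
        ((PySem.List.enumerate line.toList).filter (fun q => q.2 == '^')).isEmpty := by
      simp [List.isEmpty_iff]
    rw [List.flatMap_cons, getLastD_append, hrows]
    congr 1
    rw [hemp]
    by_cases hc : ((PySem.List.enumerate line.toList).filter (fun q => q.2 == '^')).isEmpty
    · simp [hc]
    · simp [hc, colsOf]

lemma getD_foldl_insert_g (g : Int → Int) :
    ∀ (cols : List Int) (nw : PySem.Dict Int Int) (k : Int),
      (cols.foldl (fun nw c => nw.insert c (g c)) nw).getD k 1 =
        if cols.contains k then g k else nw.getD k 1 := by
  intro cols
  induction cols with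
  | nil => intro nw k; simp
  | cons c t ih =>
    intro nw k
    rw [List.foldl_cons, ih]
    by_cases hm : t.contains k = true
    · rw [if_pos hm, if_pos (by simp only [List.contains_cons, hm, Bool.or_true])]
    · by_cases hk : k = c
      · rw [if_neg hm, if_pos (by simp [hk]),
          PySem.Dict.getD_insert, if_pos hk, hk]
      · rw [if_neg hm, if_neg (by simp [hk]; simpa using hm),
          PySem.Dict.getD_insert, if_neg hk]

lemma revDP_eq_W :
    ∀ (rows : List (List Int)) (k : Int),
      (rows.reverse.foldl
        (fun w cols => cols.foldl
          (fun nw c => nw.insert c (w.getD (c - 1) 1 + w.getD (c + 1) 1)) w)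
        (PySem.Dict.empty : PySem.Dict Int Int)).getD k 1 = W rows k := by
  intro rows
  induction rows with
  | nil => intro k; rfl
  | cons cols t ih =>
    intro k
    rw [List.reverse_cons, List.foldl_append, List.foldl_cons, List.foldl_nil]
    rw [getD_foldl_insert_g
      (fun c => (t.reverse.foldl _ PySem.Dict.empty).getD (c - 1) 1 +
        (t.reverse.foldl _ PySem.Dict.empty).getD (c + 1) 1) cols _ k]
    show _ = W (cols :: t) k
    rw [show W (cols :: t) k =
      if cols.contains k then W t (k - 1) + W t (k + 1) else W t k from rfl]
    by_cases hc : cols.contains k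
    · rw [if_pos hc, if_pos hc, ih (k - 1), ih (k + 1)]
    · rw [if_neg hc, if_neg hc, ih k]

lemma part2_alt_eq_W (lines : List String) :
    part2_alt lines = W (rowsOf lines) (startOf lines) := by
  unfold part2_alt
  rw [scanB_outer lines 0 []]
  simp only [List.nil_append]
  exact revDP_eq_W (rowsOf lines) (startOf lines)

-- ---- Pre_ gives noAdj on every splitter row ----
lemma colsOf_mem (cs : List Char) (x : Int) :
    x ∈ colsOf cs ↔ ∃ m : Nat, ∃ _ : m < cs.length, x = (m : Int) ∧ cs[m] = '^' := by
  unfold colsOf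
  constructor
  · intro hx
    obtain ⟨q, hq, rfl⟩ := List.mem_map.mp hx
    obtain ⟨hqe, hq2⟩ := List.mem_filter.mp hq
    obtain ⟨m, hm, he⟩ := (PySem.List.mem_enumerate_iff cs 0 q).mp hqe
    refine ⟨m, hm, by rw [he]; simp, ?_⟩
    have : q.2 = '^' := by simpa using hq2
    rw [he] at this; simpa using this
  · rintro ⟨m, hm, rfl, hc⟩
    refine List.mem_map.mpr ⟨((m : Int), cs[m]), List.mem_filter.mpr ⟨?_, by simpa using hc⟩, rfl⟩
    exact (PySem.List.mem_enumerate_iff cs 0 _).mpr ⟨m, hm, by simp⟩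

lemma pre_noAdj (lines : List String) (hpre : Pre_part2 lines) :
    ∀ p ∈ pairsOf lines, noAdj p.2 := by
  intro p hp a ha ha1
  unfold pairsOf at hp
  obtain ⟨q, hq, rfl⟩ := List.mem_map.mp hp
  obtain ⟨r, hr, he⟩ :=
    (PySem.List.mem_enumerate_iff lines 0 q).mp (List.mem_filter.mp hq).1
  have hline : q.2 = lines[r] := by rw [he]
  have hmem : lines[r] ∈ lines := List.getElem_mem _
  obtain ⟨m, hm, hma, hmc⟩ := (colsOf_mem q.2.toList a).mp (by simpa using ha)
  obtain ⟨m', hm', hma', hmc'⟩ := (colsOf_mem q.2.toList (a + 1)).mp (by simpa using ha1)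
  have hm1 : m' = m + 1 := by omega
  refine hpre lines[r] hmem m (by rw [← hline]; omega) ⟨?_, ?_⟩
  · rw [← hline, List.getElem?_eq_getElem hm, hmc]
  · rw [← hline, ← hm1, List.getElem?_eq_getElem hm', hmc']

-- ===== VERDICT (by name: the statement is the Claim_ definition above) =====
theorem part2_spec : Claim_equal_part2 := by
  intro lines _ hpre
  unfold Spec_part2
  rw [part2_eq_W lines (pre_noAdj lines hpre), part2_alt_eq_W lines]
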